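-- pv_equiv track=rewrite | github.com/mmammel/projects | python/leetle/20250104/missingNumber.py | solve
-- ===== SOURCE A (Python) =====
-- def solve(nums):
--   i = 0
--   for n in sorted(nums):
--     if n != i:
--       return i
--     else:
--       i = i+1
--
--   return i
-- ===== SOURCE B (Python) =====
-- from collections import Counter
--
-- def solve(nums):
--     # First i with sorted(nums)[i] != i, found from value counts in one pass:
--     # the i-th smallest element equals i  iff  #(x < i) <= i < #(x <= i).
--     c = Counter(nums)
--     below = sum(1 for n in nums if n < 0)
--     i = 0
--     while i < len(nums) and below <= i < below + c[i]:
--         below += c[i]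
--         i += 1
--     return i
-- ===== Notes on version B (the rewrite author's own statement) =====
-- stated objective: alternative
-- what changed: Replaces sort-then-scan with a counting pass: a Counter plus a running count of elements below i verifies, for i = 0,1,2,..., the order-statistic identity sorted(nums)[i] == i via #(x < i) <= i < #(x <= i), with no sorting.
import Mathlib
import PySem

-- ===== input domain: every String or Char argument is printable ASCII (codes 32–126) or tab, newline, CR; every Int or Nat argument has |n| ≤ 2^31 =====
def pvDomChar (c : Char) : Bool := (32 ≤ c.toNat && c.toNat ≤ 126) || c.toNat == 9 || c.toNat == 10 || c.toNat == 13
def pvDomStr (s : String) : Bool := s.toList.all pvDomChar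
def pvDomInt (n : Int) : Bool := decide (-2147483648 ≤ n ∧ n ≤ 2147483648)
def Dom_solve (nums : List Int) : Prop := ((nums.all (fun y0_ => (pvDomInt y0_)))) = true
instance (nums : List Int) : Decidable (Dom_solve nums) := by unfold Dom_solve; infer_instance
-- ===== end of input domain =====

-- ===== PORT A =====
-- B replaces A's sort-then-scan by one counting pass (Counter + order-statistic check).

-- the 'for n in sorted(nums)' loop with its early return
def solveLoop : List Int → Int → Int
  | [], i => i
  | n :: t, i => if n ≠ i then i else solveLoop t (i + 1)

def solve (nums : List Int) : Int :=
  solveLoop (PySem.List.sorted nums (fun x => x) false) 0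

-- ===== PORT B =====
-- the 'while i < len(nums) and below <= i < below + c[i]' loop;
-- fuel = nums.length + 1 only makes it total (i grows up to len)
def altLoop (c : PySem.Dict Int Int) (len : Int) : Nat → Int → Int → Int
  | 0, _, i => i
  | fuel + 1, below, i =>
    if i < len ∧ below ≤ i ∧ i < below + c.getD i 0 then
      altLoop c len fuel (below + c.getD i 0) (i + 1)
    else i

def solve_alt (nums : List Int) : Int :=
  let c := PySem.Dict.counter nums
  let below : Int := (nums.countP (fun n => decide (n < 0)) : Int)
  altLoop c (nums.length : Int) (nums.length + 1) below 0

-- ===== PRECONDITION & SPEC =====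
def Spec_solve (nums : List Int) (out : Int) : Prop := out = solve_alt nums
instance (nums : List Int) (out : Int) : Decidable (Spec_solve nums out) := by unfold Spec_solve; infer_instance

-- ===== CLAIM (what is proved, stated in full; the proofs are below) =====
def Claim_equal_solve : Prop := ∀ (nums : List Int), Dom_solve nums → Spec_solve nums (solve nums)

-- ===== LEMMAS AND PROOFS =====

-- splitting #(x < i+1) into #(x < i) + #(x = i) over the integers
lemma countP_lt_succ (t : List Int) (i : Int) :
    t.countP (fun x => decide (x < i + 1)) = t.countP (fun x => decide (x < i)) + t.count i := by
  induction t with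
  | nil => simp
  | cons a t ih =>
    rw [List.countP_cons, List.countP_cons, List.count_cons, ih]
    rcases lt_trichotomy a i with h | h | h
    · simp [h, show a < i + 1 by omega, show ¬ a = i by omega]; omega
    · subst h; simp; omega
    · simp [show ¬ a < i by omega, show ¬ a < i + 1 by omega, show ¬ a = i by omega]

-- A's scan over the remaining sorted suffix t agrees with B's count walk, under the
-- invariants: below = i + #(x ∈ t, x < i), the dict holds t's counts from i upward,
-- and i + |t| = len.
lemma solveLoop_eq_altLoop (fuel : Nat) :
    ∀ (t : List Int) (i below len : Int) (c : PySem.Dict Int Int),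
      t.Pairwise (· ≤ ·) →
      below = i + (t.countP (fun x => decide (x < i)) : Int) →
      (∀ v, i ≤ v → c.getD v 0 = (t.count v : Int)) →
      i + (t.length : Int) = len →
      t.length < fuel →
      solveLoop t i = altLoop c len fuel below i := by
  induction fuel with
  | zero => intro t i below len c _ _ _ _ h; omega
  | succ fuel ih =>
    intro t i below len c hs hb hc hlen hfuel
    match t with
    | [] =>
      have hil : ¬ i < len := by simp at hlen; omega
      simp [solveLoop, altLoop, hil]
    | n :: t' =>
      have hnt : ∀ x ∈ t', n ≤ x := fun x hx => (List.pairwise_cons.mp hs).1 x hx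
      have hlen' : i < len := by simp at hlen; omega
      by_cases hn : n = i
      · -- matched position: both advance
        subst hn
        have hge : ∀ x ∈ n :: t', n ≤ x := by
          intro x hx; rcases List.mem_cons.mp hx with h | h
          · omega
          · exact hnt x h
        have hcz : (n :: t').countP (fun x => decide (x < n)) = 0 := by
          rw [List.countP_eq_zero]
          intro x hx; have := hge x hx; simp; omega
        have hbelow : below = n := by rw [hb, hcz]; simp
        have hcnt : c.getD n 0 = (1 : Int) + (t'.count n : Int) := by
          rw [hc n le_rfl]; simp; push_cast; ring
        have htest : n < len ∧ below ≤ n ∧ n < below + c.getD n 0 := by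
          refine ⟨hlen', by omega, ?_⟩
          rw [hbelow, hcnt]
          have : (0 : Int) ≤ (t'.count n : Int) := by positivity
          omega
        have hczt : t'.countP (fun x => decide (x < n)) = 0 := by
          rw [List.countP_eq_zero]
          intro x hx; have := hnt x hx; simp; omega
        have hrec : solveLoop t' (n + 1) = altLoop c len fuel (below + c.getD n 0) (n + 1) := by
          apply ih
          · exact hs.of_cons
          · rw [hbelow, hcnt, countP_lt_succ t' n, hczt]
            push_cast; ring
          · intro v hv
            rw [hc v (by omega)]
            have : n ≠ v := by omega
            simp [this]
          · simp at hlen ⊢; omega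
          · simp at hfuel ⊢; omega
        simp only [solveLoop, altLoop, if_pos htest, ne_eq, not_true_eq_false, if_false]
        exact hrec
      · -- mismatch: A returns i, B's test fails
        have hA : solveLoop (n :: t') i = i := by simp [solveLoop, hn]
        rw [hA]
        rcases lt_or_gt_of_ne hn with hlt | hgt
        · -- n < i: below ≥ i + 1
          have h1 : 0 < (n :: t').countP (fun x => decide (x < i)) := by
            apply List.countP_pos_iff.mpr
            exact ⟨n, by simp, by simp [hlt]⟩
          have : ¬ (i < len ∧ below ≤ i ∧ i < below + c.getD i 0) := by
            rw [hb]; rintro ⟨-, h, -⟩; omega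
          simp only [altLoop, if_neg this]
        · -- n > i: no element < i and no element = i
          have hge : ∀ x ∈ n :: t', n ≤ x := by
            intro x hx; rcases List.mem_cons.mp hx with h | h
            · omega
            · exact hnt x h
          have hcz : (n :: t').countP (fun x => decide (x < i)) = 0 := by
            rw [List.countP_eq_zero]
            intro x hx; have := hge x hx; simp; omega
          have hc0 : c.getD i 0 = 0 := by
            rw [hc i le_rfl, List.count_eq_zero.mpr]
            · rfl
            · intro hmem; have := hge i hmem; omega
          have : ¬ (i < len ∧ below ≤ i ∧ i < below + c.getD i 0) := by
            rw [hb, hcz, hc0]; rintro ⟨-, -, h⟩; omega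
          simp only [altLoop, if_neg this]

-- ===== VERDICT (by name: the statement is the Claim_ definition above) =====
theorem solve_spec : Claim_equal_solve := by
  intro nums _
  unfold Spec_solve solve solve_alt
  have hperm := PySem.List.sorted_perm nums (fun x => x) false
  apply solveLoop_eq_altLoop
  · exact PySem.List.sorted_pairwise nums (fun x => x)
  · simp only [zero_add] -- below invariant at i = 0
    rw [hperm.countP_eq]
  · intro v _
    rw [PySem.Dict.getD_counter]
    exact congrArg _ (hperm.count_eq v).symm
  · rw [PySem.List.length_sorted]; simp
  · rw [PySem.List.length_sorted]; omega
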